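-- pv_equiv track=rewrite | github.com/yamajunn/Terminal_GUI | folder_path_split.py | folder_path_split
-- ===== SOURCE A (Python) =====
-- def folder_path_split(folder_path):
--     pp = [""]
--     for p in folder_path.split("/"):
--         if p == "":
--             break
--         pp.append(pp[-1]+p+"/")
--     pp.pop(0)
--     return pp
-- ===== SOURCE B (Python) =====
-- def folder_path_split(folder_path):
--     segs = []
--     for p in folder_path.split("/"):
--         if p == "":
--             break
--         segs.append(p)
--     return ["/".join(segs[:i + 1]) + "/" for i in range(len(segs))]
-- ===== Notes on version B (the rewrite author's own statement) =====
-- stated objective: alternative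
-- what changed: B first collects the segments before the first empty one, then builds each cumulative prefix independently by joining a growing slice of that list, instead of threading a running accumulator seeded with a sentinel element that is popped off at the end.
import Mathlib
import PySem

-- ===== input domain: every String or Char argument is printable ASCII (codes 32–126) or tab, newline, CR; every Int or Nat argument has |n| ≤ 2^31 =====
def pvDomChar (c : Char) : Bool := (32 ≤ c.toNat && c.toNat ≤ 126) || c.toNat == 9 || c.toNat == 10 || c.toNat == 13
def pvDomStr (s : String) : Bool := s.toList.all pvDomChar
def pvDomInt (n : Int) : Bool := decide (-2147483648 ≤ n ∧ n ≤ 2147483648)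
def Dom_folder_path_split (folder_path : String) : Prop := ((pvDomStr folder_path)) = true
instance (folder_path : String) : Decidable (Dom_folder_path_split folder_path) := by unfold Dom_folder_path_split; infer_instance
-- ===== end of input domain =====

-- B collects the segments before the first empty one and builds each prefix
-- independently by joining a slice, instead of threading a running accumulator
-- seeded with a sentinel "" that is popped off at the end (objective: alternative).


-- ===== PORT A =====
-- the for-loop: append pp[-1]+p+"/" until the first empty segment ('break')
def pvLoopA (pp : List String) : List String → List String
  | [] => pp
  | p :: rest =>
      if p = "" then pp
      else pvLoopA (pp ++ [PySem.List.pyGetD pp (-1) "" ++ p ++ "/"]) rest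

def folder_path_split (folder_path : String) : List String :=
  let pp := pvLoopA [""] ((PySem.Str.split? folder_path "/").getD [])
  match PySem.List.pop? pp 0 with   -- pp.pop(0); return pp
  | some (_, rest) => rest
  | none => []

-- ===== PORT B =====
-- the collecting loop of Source B: keep segments until the first empty one ('break')
def pvSegs : List String → List String
  | [] => []
  | p :: rest => if p = "" then [] else p :: pvSegs rest

def folder_path_split_alt (folder_path : String) : List String :=
  let segs := pvSegs ((PySem.Str.split? folder_path "/").getD [])
  (PySem.List.pyRange 0 (segs.length : Int)).map
    (fun i => PySem.Str.join "/" (PySem.List.slice segs none (some (i + 1))) ++ "/")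

-- ===== PRECONDITION & SPEC =====
def Spec_folder_path_split (folder_path : String) (out : List String) : Prop := out = folder_path_split_alt folder_path
instance (folder_path : String) (out : List String) : Decidable (Spec_folder_path_split folder_path out) := by unfold Spec_folder_path_split; infer_instance

-- ===== CLAIM (what is proved, stated in full; the proofs are below) =====
def Claim_equal_folder_path_split : Prop := ∀ (folder_path : String), Dom_folder_path_split folder_path → Spec_folder_path_split folder_path (folder_path_split folder_path)

-- ===== LEMMAS AND PROOFS =====

-- A's accumulator, abstracted: the list of cumulative prefixes extending `l`
def pvPref (l : String) : List String → List String
  | [] => []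
  | p :: rest => if p = "" then [] else (l ++ p ++ "/") :: pvPref (l ++ p ++ "/") rest

theorem pvLoopA_eq_pref (segs : List String) : ∀ (pp : List String) (l : String),
    pvLoopA (pp ++ [l]) segs = pp ++ l :: pvPref l segs := by
  induction segs with
  | nil => intro pp l; simp [pvLoopA, pvPref]
  | cons p rest ih =>
      intro pp l
      by_cases hp : p = ""
      · simp [pvLoopA, pvPref, hp]
      · rw [pvLoopA, if_neg hp, PySem.List.pyGetD_neg_one_append_singleton,
          show pp ++ [l] ++ [l ++ p ++ "/"] = (pp ++ [l]) ++ [l ++ p ++ "/"] from rfl,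
          ih (pp ++ [l]) (l ++ p ++ "/"), pvPref, if_neg hp]
        simp

theorem join_cons_of_ne_nil (p : String) (xs : List String) (h : xs ≠ []) :
    PySem.Str.join "/" (p :: xs) = p ++ "/" ++ PySem.Str.join "/" xs := by
  obtain ⟨x, xs', rfl⟩ := List.exists_cons_of_ne_nil h
  apply String.toList_injective
  simp [PySem.Str.toList_join, String.toList_append, PySem.Chars.join_cons_cons]

theorem join_singleton_str (p : String) : PySem.Str.join "/" [p] = p := by
  apply String.toList_injective
  simp [PySem.Str.toList_join, PySem.Chars.join_singleton]

theorem pvPref_eq_joins (segs : List String) : ∀ (l : String),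
    pvPref l segs = (List.range (pvSegs segs).length).map
      (fun i => l ++ PySem.Str.join "/" ((pvSegs segs).take (i + 1)) ++ "/") := by
  induction segs with
  | nil => intro l; simp [pvPref, pvSegs]
  | cons p rest ih =>
      intro l
      by_cases hp : p = ""
      · simp [pvPref, pvSegs, hp]
      · rw [pvPref, if_neg hp, pvSegs, if_neg hp]
        rw [show (p :: pvSegs rest).length = (pvSegs rest).length + 1 from rfl,
          List.range_succ_eq_map, List.map_cons, List.map_map]
        refine List.cons_eq_cons.mpr ⟨?_, ?_⟩
        · rw [List.take_succ_cons, List.take_zero, join_singleton_str]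
        · rw [ih (l ++ p ++ "/")]
          apply List.map_congr_left
          intro i hi
          rw [List.mem_range] at hi
          simp only [Function.comp]
          rw [show Nat.succ i + 1 = (i + 1) + 1 from rfl, List.take_succ_cons,
            join_cons_of_ne_nil p _ (by
              intro h
              have hlen := congrArg List.length h
              simp at hlen
              rw [hlen] at hi
              simp at hi)]
          simp [String.append_assoc]

-- ===== VERDICT (by name: the statement is the Claim_ definition above) =====
theorem folder_path_split_spec : Claim_equal_folder_path_split := by
  intro fp _
  unfold Spec_folder_path_split folder_path_split folder_path_split_alt
  dsimp only
  rw [show ([""] : List String) = [] ++ [""] from rfl, pvLoopA_eq_pref, List.nil_append,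
    PySem.List.pop?_zero_cons]
  dsimp only
  rw [pvPref_eq_joins, PySem.List.pyRange_zero_natCast, List.map_map]
  apply List.map_congr_left
  intro i hi
  simp only [Function.comp]
  rw [show ((i : Int) + 1) = ((i + 1 : Nat) : Int) by push_cast; ring,
    PySem.List.slice_to_natCast]
  simp
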